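-- pv_equiv track=rewrite | github.com/orionmc/Warehouse | DataExtraction.py | strip_signature
-- ===== SOURCE A (Python) =====
-- SIGNATURE_TRIGGERS = [
--     "Kind regards",
--     "Best regards",
--     "Sent from my",
--     "Sincerely",
--     "Connor",
--     "Stuart",
--     "Nelson",
--     "Ronnie",
--     "Michael",
--     "Darren",
--     "David",
--     "Alan",
--     "Ben",
--     "Ritesh",
--     "Thabani",
-- ]
--
-- def strip_signature(body, triggers=SIGNATURE_TRIGGERS):
--     body_lower = body.lower()
--     earliest_index = len(body)
--     for trigger in triggers:
--         trigger_index = body_lower.find(trigger.lower())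
--         if trigger_index != -1 and trigger_index < earliest_index:
--             earliest_index = trigger_index
--     return body[:earliest_index].rstrip()
-- ===== SOURCE B (Python) =====
-- SIGNATURE_TRIGGERS = [
--     "Kind regards",
--     "Best regards",
--     "Sent from my",
--     "Sincerely",
--     "Connor",
--     "Stuart",
--     "Nelson",
--     "Ronnie",
--     "Michael",
--     "Darren",
--     "David",
--     "Alan",
--     "Ben",
--     "Ritesh",
--     "Thabani",
-- ]
--
-- def strip_signature(body, triggers=SIGNATURE_TRIGGERS):
--     # Single left-to-right scan: stop at the first position where any
--     # (lower-cased) trigger starts, instead of one full find() per trigger.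
--     bl = body.lower()
--     tls = [t.lower() for t in triggers]
--     cut = len(body)
--     for i in range(len(body)):
--         if any(bl.startswith(t, i) for t in tls):
--             cut = i
--             break
--     return body[:cut].rstrip()
-- ===== Notes on version B (the rewrite author's own statement) =====
-- stated objective: faster
-- what changed: Replaces A's per-trigger full find() scans (taking the minimum of k independent searches over the whole body) by a single left-to-right scan over the body that stops at the first position where any lower-cased trigger starts.
import Mathlib
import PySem

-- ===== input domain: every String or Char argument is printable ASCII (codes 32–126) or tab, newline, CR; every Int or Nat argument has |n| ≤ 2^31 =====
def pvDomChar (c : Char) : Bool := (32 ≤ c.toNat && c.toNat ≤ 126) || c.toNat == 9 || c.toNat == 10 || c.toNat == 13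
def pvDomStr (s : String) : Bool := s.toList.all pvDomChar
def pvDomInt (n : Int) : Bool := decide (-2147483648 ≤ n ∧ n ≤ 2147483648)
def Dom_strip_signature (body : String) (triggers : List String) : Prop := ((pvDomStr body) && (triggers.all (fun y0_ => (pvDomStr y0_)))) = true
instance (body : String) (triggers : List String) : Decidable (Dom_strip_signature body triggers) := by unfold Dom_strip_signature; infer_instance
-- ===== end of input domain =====

-- B replaces A's one full find() scan per trigger by ONE left-to-right scan of the body
-- that stops at the first position where any lower-cased trigger starts (objective: alternative).

-- ===== PORT A =====
-- literal port of A: min over triggers of body.lower().find(trigger.lower()), then body[:e].rstrip()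
def strip_signature (body : String) (triggers : List String) : String :=
  let body_lower := PySem.Str.lower body
  let earliest_index : Int := triggers.foldl
    (fun e trigger =>
      let ti := PySem.Str.find body_lower (PySem.Str.lower trigger)
      if ti ≠ -1 ∧ ti < e then ti else e)
    (PySem.Str.len body)
  PySem.Str.rstrip (PySem.Str.slice body none (some earliest_index))

-- ===== PORT B =====
-- port of Source B: first index i of range(len(body)) at which some lowered trigger starts, else len(body).
-- bl.startswith(t, i) with 0 ≤ i is ported exactly as a prefix test on (bl.toList.drop i).
def strip_signature_alt (body : String) (triggers : List String) : String :=
  let blc := (PySem.Str.lower body).toList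
  let tls := triggers.map (fun t => (PySem.Str.lower t).toList)
  let n := body.toList.length
  let cut : Nat :=
    ((List.range n).find? (fun i => tls.any (fun t => PySem.Chars.startswith (blc.drop i) t))).getD n
  PySem.Str.rstrip (PySem.Str.slice body none (some (cut : Int)))

-- ===== PRECONDITION & SPEC =====
def Spec_strip_signature (body : String) (triggers : List String) (out : String) : Prop := out = strip_signature_alt body triggers
instance (body : String) (triggers : List String) (out : String) : Decidable (Spec_strip_signature body triggers out) := by unfold Spec_strip_signature; infer_instance

-- ===== CLAIM (what is proved, stated in full; the proofs are below) =====
def Claim_equal_strip_signature : Prop := ∀ (body : String) (triggers : List String), Dom_strip_signature body triggers → Spec_strip_signature body triggers (strip_signature body triggers)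

-- ===== LEMMAS AND PROOFS =====

-- characterisation of A's running-minimum fold (F t = the find index of trigger t):
-- the result is the initial value or some F t ≠ -1, it bounds every F t ≠ -1 from below,
-- and it never exceeds the initial value
theorem pvFold_char (F : String → Int) (ts : List String) (a : Int) :
    (ts.foldl (fun e t => if F t ≠ -1 ∧ F t < e then F t else e) a = a ∨
      ∃ t ∈ ts, ts.foldl (fun e t => if F t ≠ -1 ∧ F t < e then F t else e) a = F t ∧ F t ≠ -1) ∧
    (∀ t ∈ ts, F t ≠ -1 → ts.foldl (fun e t => if F t ≠ -1 ∧ F t < e then F t else e) a ≤ F t) ∧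
    ts.foldl (fun e t => if F t ≠ -1 ∧ F t < e then F t else e) a ≤ a := by
  induction ts generalizing a with
  | nil => simp
  | cons t0 ts ih =>
    simp only [List.foldl_cons]
    by_cases h : F t0 ≠ -1 ∧ F t0 < a
    · rw [if_pos h]
      obtain ⟨ih1, ih2, ih3⟩ := ih (F t0)
      refine ⟨?_, ?_, by omega⟩
      · rcases ih1 with h1 | ⟨t, ht, h1, h2⟩
        · exact Or.inr ⟨t0, by simp, h1, h.1⟩
        · exact Or.inr ⟨t, by simp [ht], h1, h2⟩
      · intro t ht hne
        rcases List.mem_cons.mp ht with rfl | ht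
        · exact ih3
        · exact ih2 t ht hne
    · rw [if_neg h]
      obtain ⟨ih1, ih2, ih3⟩ := ih a
      refine ⟨?_, ?_, ih3⟩
      · rcases ih1 with h1 | ⟨t, ht, h1, h2⟩
        · exact Or.inl h1
        · exact Or.inr ⟨t, by simp [ht], h1, h2⟩
      · intro t ht hne
        rcases List.mem_cons.mp ht with rfl | ht
        · have : a ≤ F t := by
            rcases not_and_or.mp h with h' | h'
            · exact absurd hne (by simpa using h')
            · omega
          omega
        · exact ih2 t ht hne

-- first match of find? over a range: every earlier index fails the test
theorem pvFind?_range_min {n i : Nat} {p : Nat → Bool}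
    (h : (List.range n).find? p = some i) : ∀ j < i, p j = false := by
  rw [List.find?_eq_some_iff_append] at h
  obtain ⟨hp, as, bs, heq, hmin⟩ := h
  have hlen : as.length < n := by
    have := congrArg List.length heq
    simp at this; omega
  have hi : i = as.length := by
    have h2 : (List.range n)[as.length]? = some i := by
      rw [heq]; simp
    rw [List.getElem?_range hlen] at h2
    exact (Option.some_inj.mp h2).symm
  have hastake : as = List.range as.length := by
    have hpre : as <+: List.range n := ⟨i :: bs, heq.symm⟩
    have h3 := List.prefix_iff_eq_take.mp hpre
    rw [List.take_range] at h3
    simpa [Nat.min_eq_left (le_of_lt hlen)] using h3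
  intro j hj
  have hjmem : j ∈ as := by
    rw [hastake]; exact List.mem_range.mpr (by omega)
  simpa using hmin j hjmem

-- the crux: A's running minimum of first-occurrence indices equals B's first-match index
theorem pvMain (body : String) (triggers : List String) :
    triggers.foldl (fun e t =>
        if PySem.Chars.find (PySem.Chars.lower body.toList) (PySem.Chars.lower t.toList) ≠ -1 ∧
            PySem.Chars.find (PySem.Chars.lower body.toList) (PySem.Chars.lower t.toList) < e
        then PySem.Chars.find (PySem.Chars.lower body.toList) (PySem.Chars.lower t.toList) else e)
      (body.toList.length : Int)
      = (((List.range body.toList.length).find?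
          (fun i => (triggers.map (fun t => PySem.Chars.lower t.toList)).any
            (fun t => PySem.Chars.startswith ((PySem.Chars.lower body.toList).drop i) t))).getD
          body.toList.length : Int) := by
  set blc := PySem.Chars.lower body.toList with hblc
  set n := body.toList.length with hn
  have hlenblc : blc.length = n := by simp [hblc, hn, PySem.Chars.lower]
  set F : String → Int := fun t => PySem.Chars.find blc (PySem.Chars.lower t.toList) with hF
  set p : Nat → Bool := fun i => (triggers.map (fun t => PySem.Chars.lower t.toList)).any
      (fun t => PySem.Chars.startswith (blc.drop i) t) with hp
  have hpiff : ∀ i, p i = true ↔ ∃ t ∈ triggers, PySem.Chars.lower t.toList <+: blc.drop i := by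
    intro i
    simp [hp, PySem.Chars.startswith_iff]
  set e := triggers.foldl (fun e t => if F t ≠ -1 ∧ F t < e then F t else e) (n : Int) with he
  obtain ⟨h1, h2, h3⟩ := pvFold_char F triggers (n : Int)
  rw [← he] at h1 h2 h3
  have hFle : ∀ t, F t ≤ (n : Int) := by
    intro t
    have := PySem.Chars.find_le_length blc (PySem.Chars.lower t.toList)
    rw [hlenblc] at this; exact this
  have hFge : ∀ t, -1 ≤ F t := fun t => PySem.Chars.neg_one_le_find _ _
  have hFspec : ∀ t, 0 ≤ F t →
      PySem.Chars.lower t.toList <+: blc.drop (F t).toNat ∧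
      ∀ i < (F t).toNat, ¬ PySem.Chars.lower t.toList <+: blc.drop i := by
    intro t h0
    exact PySem.Chars.find_spec (s := blc) (sub := PySem.Chars.lower t.toList) h0
  have h0e : 0 ≤ e := by
    rcases h1 with h | ⟨t, _, h, hne⟩
    · rw [h]; positivity
    · have := hFge t; omega
  cases hfind : (List.range n).find? p with
  | none =>
    have hnone : ∀ j < n, p j = false := by
      intro j hj
      have := List.find?_eq_none.mp hfind j (List.mem_range.mpr hj)
      simpa using this
    have : e = (n : Int) := by
      rcases h1 with h | ⟨t, htmem, h, hne⟩
      · exact h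
      · have h0f : 0 ≤ F t := by have := hFge t; omega
        obtain ⟨hocc, -⟩ := hFspec t h0f
        by_cases hlt : (F t).toNat < n
        · exact absurd ((hpiff _).mpr ⟨t, htmem, hocc⟩) (by simp [hnone _ hlt])
        · -- F t = n: the lowered trigger is a prefix of [], hence empty, hence F t = 0 and n = 0
          have hfn : (F t).toNat = n := by have := hFle t; omega
          have hdrop : blc.drop (F t).toNat = [] := by
            rw [hfn, ← hlenblc]; simp
          rw [hdrop] at hocc
          have htnil : PySem.Chars.lower t.toList = [] := List.prefix_nil.mp hocc
          have : F t = 0 := by rw [hF]; simp only [htnil]; exact PySem.Chars.find_nil blc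
          omega
    simp [this]
  | some i =>
    have hpi : p i = true := List.find?_some hfind
    have hin : i < n := List.mem_range.mp (List.mem_of_find?_eq_some hfind)
    have hmin : ∀ j < i, p j = false := pvFind?_range_min hfind
    obtain ⟨t, ht, hocc⟩ := (hpiff i).mp hpi
    have hFne : F t ≠ -1 := by
      rw [hF]
      simp only []
      rw [PySem.Chars.find_ne_neg_one_iff, ← PySem.Chars.isIn_iff_infix,
        ← PySem.Chars.exists_prefix_drop_iff_isIn]
      exact ⟨i, hocc⟩
    have h0f : 0 ≤ F t := by have := hFge t; omega
    obtain ⟨-, hminf⟩ := hFspec t h0f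
    have hfli : (F t).toNat ≤ i := by
      by_contra hcon
      exact hminf i (by omega) hocc
    have hei : e ≤ (i : Int) := by
      have := h2 t ht hFne; omega
    have hie : (i : Int) ≤ e := by
      by_contra hcon
      rcases h1 with h | ⟨t', ht', h, hne'⟩
      · omega
      · have h0f' : 0 ≤ F t' := by have := hFge t'; omega
        obtain ⟨hocc', -⟩ := hFspec t' h0f'
        have hjlt : e.toNat < i := by omega
        have hpe : p e.toNat = true := by
          rw [hpiff]
          exact ⟨t', ht', by rw [h]; exact hocc'⟩
        rw [hmin _ hjlt] at hpe
        exact Bool.noConfusion hpe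
    simp only [Option.getD_some]
    omega

-- ===== VERDICT (by name: the statement is the Claim_ definition above) =====
theorem strip_signature_spec : Claim_equal_strip_signature := by
  intro body triggers _
  unfold Spec_strip_signature strip_signature strip_signature_alt
  simp only [PySem.Str.find_eq, PySem.Str.toList_lower, PySem.Str.len_eq]
  rw [pvMain body triggers]
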